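-- pv_equiv track=rewrite | github.com/djordje-djokovic/companybot | bots/linkedin_bot.py | min_case
-- ===== SOURCE A (Python) =====
-- def min_case(str_full, n_max=4, separator=' '):
--     str_split = str_full.strip().split(separator)
--     new_str = ''
--     for s in str_split:
--         if new_str == '':
--             new_str = s
--         else:
--             new_str = new_str + separator + s
--         n_case = len(new_str)
--         if n_case >= n_max:
--             return new_str
--     return new_str
-- ===== SOURCE B (Python) =====
-- def min_case(str_full, n_max=4, separator=' '):
--     words = str_full.strip().split(separator)
--     lengths = []
--     total = -len(separator)
--     for w in words:
--         total += len(separator) + len(w)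
--         lengths.append(total)
--     idx = next((k for k, t in enumerate(lengths) if t >= n_max), len(words) - 1)
--     return separator.join(words[:idx + 1])
-- ===== Notes on version B (the rewrite author's own statement) =====
-- stated objective: alternative
-- what changed: B replaces A's word-by-word string accumulation with early return by building the table of joined-prefix lengths (a running int counter appended to a list), scanning it once for the first entry >= n_max, and producing the result with a single join of the chosen word prefix.
-- intended difference: On inputs whose stripped string starts with the separator (with n_max >= 1), A's empty-accumulator branch silently drops the leading empty split pieces (A(',a',1,',') returns 'a'), while B returns the actual join of the shortest word prefix reaching n_max (',a'), the intended value. — e.g. on min_case(",a", 1, ","): A returns "a", B returns ",a"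
import Mathlib
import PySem

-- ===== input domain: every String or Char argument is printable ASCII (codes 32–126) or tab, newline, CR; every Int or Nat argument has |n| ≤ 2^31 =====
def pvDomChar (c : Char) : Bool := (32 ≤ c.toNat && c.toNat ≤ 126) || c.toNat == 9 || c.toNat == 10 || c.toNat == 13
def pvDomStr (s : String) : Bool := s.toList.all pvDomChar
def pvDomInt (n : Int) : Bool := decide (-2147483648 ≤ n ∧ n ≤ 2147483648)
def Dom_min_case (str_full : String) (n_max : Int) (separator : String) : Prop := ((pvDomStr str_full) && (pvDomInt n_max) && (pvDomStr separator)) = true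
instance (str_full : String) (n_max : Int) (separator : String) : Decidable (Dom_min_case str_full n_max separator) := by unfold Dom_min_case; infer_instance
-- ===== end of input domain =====

-- B computes a table of joined-prefix lengths, scans it once for the first entry
-- reaching n_max, and builds the result with one join (objective: alternative decomposition).

-- ===== PORT A =====
-- A's for-loop: running string new_str, early return once its length reaches n_max
def pvLoopA (n_max : Int) (sep : List Char) (acc : List Char) : List (List Char) → List Char
  | [] => acc
  | s :: rest =>
    let acc' := if acc = [] then s else acc ++ sep ++ s
    if n_max ≤ (acc'.length : Int) then acc' else pvLoopA n_max sep acc' rest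

def min_case (str_full : String) (n_max : Int) (separator : String) : String :=
  match PySem.Chars.split? (PySem.Chars.strip str_full.toList) separator.toList with
  | none => ""   -- separator = "": Python raises ValueError here; excluded by Pre_
  | some ws => String.ofList (pvLoopA n_max separator.toList [] ws)

-- ===== PORT B =====
-- Source B's for-loop building `lengths`: running total starting at -len(separator)
def pvCum (L t : Int) : List (List Char) → List Int
  | [] => []
  | w :: rest => (t + L + (w.length : Int)) :: pvCum L (t + L + (w.length : Int)) rest

def min_case_alt (str_full : String) (n_max : Int) (separator : String) : String :=
  match PySem.Chars.split? (PySem.Chars.strip str_full.toList) separator.toList with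
  | none => ""   -- separator = "": Source B's split raises too; excluded by Pre_
  | some ws =>
    let L : Int := (separator.toList.length : Int)
    let lengths := pvCum L (-L) ws
    let idx := (lengths.findIdx? (fun t => n_max ≤ t)).getD (ws.length - 1)
    String.ofList (PySem.Chars.join separator.toList (ws.take (idx + 1)))

-- ===== PRECONDITION & SPEC =====
-- Pre_ excludes only separator = "", on which Python's str.split raises ValueError (both A and B).
def Pre_min_case (str_full : String) (n_max : Int) (separator : String) : Prop := separator ≠ ""
instance (str_full : String) (n_max : Int) (separator : String) : Decidable (Pre_min_case str_full n_max separator) := by unfold Pre_min_case; infer_instance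
def pvWitness_min_case : String × Int × String := ("hello world", 4, " ")

-- On inputs whose stripped string starts with the separator (and n_max ≥ 1), A's
-- empty-accumulator branch silently drops the leading empty split pieces (A(",a",1,",") = "a"),
-- while B returns the actual join of the shortest word prefix reaching n_max (",a"),
-- which is the intended "join words until min length" value.
def D_min_case (str_full : String) (n_max : Int) (separator : String) : Prop :=
  separator.toList.isPrefixOf (PySem.Chars.strip str_full.toList) = true ∧ 1 ≤ n_max
instance (str_full : String) (n_max : Int) (separator : String) : Decidable (D_min_case str_full n_max separator) := by unfold D_min_case; infer_instance

def Spec_min_case (str_full : String) (n_max : Int) (separator : String) (out : String) : Prop := ¬ D_min_case str_full n_max separator → out = min_case_alt str_full n_max separator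
instance (str_full : String) (n_max : Int) (separator : String) (out : String) : Decidable (Spec_min_case str_full n_max separator out) := by unfold Spec_min_case; infer_instance

def pvDiffWitness_min_case : String × Int × String := (",a", 1, ",")
def pvDiffWitnessOut_min_case : String × String := ("a", ",a")

-- ===== CLAIM (what is proved, stated in full; the proofs are below) =====
def Claim_unchanged_min_case : Prop := ∀ (str_full : String) (n_max : Int) (separator : String), Dom_min_case str_full n_max separator → Pre_min_case str_full n_max separator → Spec_min_case str_full n_max separator (min_case str_full n_max separator)
def Claim_exact_min_case : Prop := ∀ (str_full : String) (n_max : Int) (separator : String), Dom_min_case str_full n_max separator → Pre_min_case str_full n_max separator → D_min_case str_full n_max separator → min_case str_full n_max separator ≠ min_case_alt str_full n_max separator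
def Claim_changed_min_case : Prop := Dom_min_case (pvDiffWitness_min_case.1) (pvDiffWitness_min_case.2.1) (pvDiffWitness_min_case.2.2) ∧ Pre_min_case (pvDiffWitness_min_case.1) (pvDiffWitness_min_case.2.1) (pvDiffWitness_min_case.2.2) ∧ D_min_case (pvDiffWitness_min_case.1) (pvDiffWitness_min_case.2.1) (pvDiffWitness_min_case.2.2) ∧ min_case (pvDiffWitness_min_case.1) (pvDiffWitness_min_case.2.1) (pvDiffWitness_min_case.2.2) = pvDiffWitnessOut_min_case.1 ∧ min_case_alt (pvDiffWitness_min_case.1) (pvDiffWitness_min_case.2.1) (pvDiffWitness_min_case.2.2) = pvDiffWitnessOut_min_case.2 ∧ pvDiffWitnessOut_min_case.1 ≠ pvDiffWitnessOut_min_case.2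

-- ===== LEMMAS AND PROOFS =====

-- flatten of (sep ++ w) pieces: the tail of a join
def pvJoinPre (sep : List Char) (ws : List (List Char)) : List Char := (ws.map (sep ++ ·)).flatten

theorem pvJoinPre_nil (sep : List Char) : pvJoinPre sep [] = [] := rfl
theorem pvJoinPre_cons (sep w : List Char) (ws : List (List Char)) :
    pvJoinPre sep (w :: ws) = sep ++ w ++ pvJoinPre sep ws := by
  simp [pvJoinPre]

theorem pvJoin_eq (sep w : List Char) (ws : List (List Char)) :
    PySem.Chars.join sep (w :: ws) = w ++ pvJoinPre sep ws := by
  induction ws generalizing w with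
  | nil => simp [pvJoinPre, PySem.Chars.join_singleton]
  | cons v vs ih =>
      rw [PySem.Chars.join_cons_cons, ih, pvJoinPre_cons]
      simp

-- accumulator lemma for PySem's split loop
theorem pvGo_acc (sep : List Char) (fuel : Nat) (l cur : List Char) (acc : List (List Char)) :
    PySem.Chars.splitOn.go sep fuel l cur acc =
      acc.reverse ++ PySem.Chars.splitOn.go sep fuel l cur [] := by
  induction fuel generalizing l cur acc with
  | zero => simp [PySem.Chars.splitOn.go]
  | succ f ih =>
      cases l with
      | nil => simp [PySem.Chars.splitOn.go]
      | cons c rest =>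
          by_cases hp : sep.isPrefixOf (c :: rest) = true
          · simp only [PySem.Chars.splitOn.go, hp, if_true]
            rw [ih _ _ (cur.reverse :: acc), ih _ _ [cur.reverse]]
            simp
          · simp only [PySem.Chars.splitOn.go, hp, if_false]
            exact ih _ _ acc

-- the first piece produced by the split loop extends cur.reverse
theorem pvGo_head (sep : List Char) (fuel : Nat) (l cur : List Char) :
    ∃ w rest, PySem.Chars.splitOn.go sep fuel l cur [] = (cur.reverse ++ w) :: rest := by
  induction fuel generalizing l cur with
  | zero => exact ⟨l, [], by simp [PySem.Chars.splitOn.go]⟩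
  | succ f ih =>
      cases l with
      | nil => exact ⟨[], [], by simp [PySem.Chars.splitOn.go]⟩
      | cons c rest =>
          by_cases hp : sep.isPrefixOf (c :: rest) = true
          · refine ⟨[], PySem.Chars.splitOn.go sep f (List.drop sep.length (c :: rest)) [] [], ?_⟩
            simp only [PySem.Chars.splitOn.go, hp, if_true]
            rw [pvGo_acc]
            simp
          · obtain ⟨w, r, hw⟩ := ih rest (c :: cur)
            refine ⟨c :: w, r, ?_⟩
            simp only [PySem.Chars.splitOn.go, hp, if_false]
            rw [hw]
            simp

-- splitOn of a nonempty string whose start is not the separator: nonempty first piece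
theorem pvSplitOn_head (sep : List Char) (c : Char) (t : List Char)
    (hp : ¬ sep.isPrefixOf (c :: t) = true) :
    ∃ w rest, PySem.Chars.splitOn (c :: t) sep = (c :: w) :: rest := by
  unfold PySem.Chars.splitOn
  simp only [List.length_cons, PySem.Chars.splitOn.go, hp, if_false]
  obtain ⟨w, r, hw⟩ := pvGo_head sep (t.length + 1) t [c]
  exact ⟨w, r, by rw [hw]; simp⟩

theorem pvSplitOn_nil (sep : List Char) : PySem.Chars.splitOn [] sep = [[]] := by
  simp [PySem.Chars.splitOn, PySem.Chars.splitOn.go]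

-- core invariant of A's loop (acc nonempty): it returns acc extended by the prefix
-- of rest chosen by the first length entry that reaches n_max (all of rest if none)
theorem pvLoopA_core (n : Int) (sep : List Char) (rest : List (List Char)) :
    ∀ acc : List Char, acc ≠ [] →
    pvLoopA n sep acc rest =
      match (pvCum (sep.length : Int) (acc.length : Int) rest).findIdx? (fun c => n ≤ c) with
      | some i => acc ++ pvJoinPre sep (rest.take (i + 1))
      | none => acc ++ pvJoinPre sep rest := by
  induction rest with
  | nil => intro acc hacc; simp [pvLoopA, pvCum, pvJoinPre]
  | cons w rest ih =>
      intro acc hacc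
      have hacc' : acc ++ sep ++ w ≠ [] := by
        intro h
        rw [List.append_eq_nil_iff, List.append_eq_nil_iff] at h
        exact hacc h.1.1
      have hlen : ((acc ++ sep ++ w).length : Int) =
          (acc.length : Int) + (sep.length : Int) + (w.length : Int) := by
        simp; push_cast; ring
      simp only [pvLoopA, if_neg hacc, pvCum, List.findIdx?_cons]
      by_cases hc : n ≤ (acc.length : Int) + (sep.length : Int) + (w.length : Int)
      · rw [if_pos (by rw [hlen]; exact hc)]
        simp only [hc, decide_true, cond_true]
        simp [pvJoinPre_cons, pvJoinPre_nil]
      · rw [if_neg (by rw [hlen]; exact hc)]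
        simp only [hc, decide_false, cond_false]
        rw [ih _ hacc', hlen]
        cases hfi : ((pvCum (sep.length : Int) ((acc.length : Int) + (sep.length : Int) + (w.length : Int)) rest).findIdx? (fun c => n ≤ c)) with
        | none => simp [pvJoinPre_cons]
        | some i => simp [pvJoinPre_cons, List.take_succ_cons]

-- nonempty first word: A's loop equals B's table-scan-and-join
theorem pv_tail (n : Int) (sep : List Char) (w : List Char) (rest : List (List Char)) (hw : w ≠ []) :
    pvLoopA n sep [] (w :: rest) =
      PySem.Chars.join sep ((w :: rest).take
        ((((pvCum (sep.length : Int) (-(sep.length : Int)) (w :: rest)).findIdx? (fun c => n ≤ c)).getD ((w :: rest).length - 1)) + 1)) := by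
  have hL : -(sep.length : Int) + (sep.length : Int) + (w.length : Int) = (w.length : Int) := by ring
  have hc : pvCum (sep.length : Int) (-(sep.length : Int)) (w :: rest) =
      (w.length : Int) :: pvCum (sep.length : Int) (w.length : Int) rest := by
    simp [pvCum, hL]
  rw [hc, List.findIdx?_cons]
  simp only [pvLoopA]
  norm_num
  by_cases hcase : n ≤ (w.length : Int)
  · rw [if_pos hcase]
    simp [hcase, PySem.Chars.join_singleton]
  · rw [if_neg hcase]
    rw [pvLoopA_core n sep rest w hw]
    simp only [hcase, decide_false, cond_false]
    cases hfi : ((pvCum (sep.length : Int) ((w.length : Int)) rest).findIdx? (fun c => n ≤ c)) with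
    | some i =>
        simp only [hfi, Option.map_some, Option.getD_some, List.take_succ_cons]
        rw [pvJoin_eq]
        simp
    | none =>
        simp only [hfi, Option.map_none, Option.getD_none, List.length_cons,
          Nat.add_sub_cancel]
        rw [List.take_of_length_le (by simp), pvJoin_eq]

-- ----- tightness: inside D_ the two programs differ everywhere -----

-- the leading run of empty pieces (proof-side helper)
def pvDropEmpty : List (List Char) → List (List Char)
  | [] => []
  | w :: rest => if w = [] then pvDropEmpty rest else w :: rest

theorem pvDropEmpty_head_ne (ws : List (List Char)) (w : List Char) (rest : List (List Char))
    (h : pvDropEmpty ws = w :: rest) : w ≠ [] := by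
  induction ws with
  | nil => simp [pvDropEmpty] at h
  | cons v vs ih =>
      by_cases hv : v = []
      · simp [pvDropEmpty, hv] at h; exact ih h
      · simp [pvDropEmpty, hv] at h; exact h.1 ▸ hv

-- 0 < n_max: leading empty pieces leave A's accumulator empty
theorem pvLoopA_dropEmpty (n : Int) (sep : List Char) (ws : List (List Char)) (hn : 0 < n) :
    pvLoopA n sep [] ws = pvLoopA n sep [] (pvDropEmpty ws) := by
  induction ws with
  | nil => rfl
  | cons w rest ih =>
      by_cases hw : w = []
      · subst hw
        simp only [pvLoopA, pvDropEmpty]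
        norm_num
        rw [if_neg (by simpa using hn.not_ge)]
        exact ih
      · simp [pvDropEmpty, hw]

-- rejoining the split pieces gives back the scanned text
theorem pvGo_join (sep : List Char) (hsep : sep ≠ []) :
    ∀ (fuel : Nat) (l cur : List Char), l.length < fuel →
    PySem.Chars.join sep (PySem.Chars.splitOn.go sep fuel l cur []) = cur.reverse ++ l := by
  intro fuel
  induction fuel with
  | zero => intro l cur h; omega
  | succ f ih =>
      intro l cur h
      cases l with
      | nil => simp [PySem.Chars.splitOn.go, PySem.Chars.join_singleton]
      | cons c rest =>
          have hL : 0 < sep.length := List.length_pos_of_ne_nil hsep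
          simp only [List.length_cons] at h
          by_cases hp : sep.isPrefixOf (c :: rest) = true
          · have hstep : PySem.Chars.splitOn.go sep (f + 1) (c :: rest) cur [] =
                cur.reverse :: PySem.Chars.splitOn.go sep f (List.drop sep.length (c :: rest)) [] [] := by
              simp only [PySem.Chars.splitOn.go, hp, if_true]
              rw [pvGo_acc]
              simp
            have hlen : (List.drop sep.length (c :: rest)).length < f := by
              simp only [List.length_drop, List.length_cons]
              omega
            obtain ⟨w, r, hw⟩ := pvGo_head sep f (List.drop sep.length (c :: rest)) []
            simp only [List.reverse_nil, List.nil_append] at hw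
            rw [hstep, hw, PySem.Chars.join_cons_cons, ← hw, ih _ _ hlen]
            obtain ⟨u, hu⟩ := List.isPrefixOf_iff_prefix.mp hp
            rw [← hu, List.drop_left]
            simp
          · have hstep : PySem.Chars.splitOn.go sep (f + 1) (c :: rest) cur [] =
                PySem.Chars.splitOn.go sep f rest (c :: cur) [] := by
              simp [PySem.Chars.splitOn.go, hp]
            rw [hstep, ih rest (c :: cur) (by omega)]
            simp

-- after dropping the leading empty pieces, the remaining join does not start with sep
theorem pvGo_dropEmpty_not_prefix (sep : List Char) (hsep : sep ≠ []) :
    ∀ (fuel : Nat) (l : List Char), l.length < fuel →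
    pvDropEmpty (PySem.Chars.splitOn.go sep fuel l [] []) ≠ [] →
    ¬ sep.isPrefixOf (PySem.Chars.join sep (pvDropEmpty (PySem.Chars.splitOn.go sep fuel l [] []))) = true := by
  intro fuel
  induction fuel with
  | zero => intro l h; omega
  | succ f ih =>
      intro l h hne
      cases l with
      | nil => simp [PySem.Chars.splitOn.go, pvDropEmpty] at hne
      | cons c rest =>
          have hL : 0 < sep.length := List.length_pos_of_ne_nil hsep
          simp only [List.length_cons] at h
          by_cases hp : sep.isPrefixOf (c :: rest) = true
          · have hstep : PySem.Chars.splitOn.go sep (f + 1) (c :: rest) [] [] =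
                [] :: PySem.Chars.splitOn.go sep f (List.drop sep.length (c :: rest)) [] [] := by
              simp only [PySem.Chars.splitOn.go, hp, if_true]
              rw [pvGo_acc]
              simp
            have hlen : (List.drop sep.length (c :: rest)).length < f := by
              simp only [List.length_drop, List.length_cons]
              omega
            rw [hstep] at hne ⊢
            simp only [pvDropEmpty, if_pos rfl] at hne ⊢
            exact ih _ hlen hne
          · -- the first piece is nonempty, so nothing is dropped and the join is the text itself
            have hstep : PySem.Chars.splitOn.go sep (f + 1) (c :: rest) [] [] =
                PySem.Chars.splitOn.go sep f rest [c] [] := by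
              simp [PySem.Chars.splitOn.go, hp]
            obtain ⟨w, r, hw⟩ := pvGo_head sep f rest [c]
            have hshape : PySem.Chars.splitOn.go sep (f + 1) (c :: rest) [] [] = (c :: w) :: r := by
              rw [hstep, hw]; simp
            have hdrop : pvDropEmpty (PySem.Chars.splitOn.go sep (f + 1) (c :: rest) [] []) =
                PySem.Chars.splitOn.go sep (f + 1) (c :: rest) [] [] := by
              rw [hshape]; simp [pvDropEmpty]
            rw [hdrop, pvGo_join sep hsep (f + 1) (c :: rest) [] (by simp; omega)]
            simpa using hp

-- splitOn of a text starting with sep: an empty first piece, then the scan of the rest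
theorem pvSplit_prefix (sep l : List Char) (hsep : sep ≠ []) (hp : sep.isPrefixOf l = true) :
    PySem.Chars.splitOn l sep =
      [] :: PySem.Chars.splitOn.go sep l.length (l.drop sep.length) [] [] := by
  cases l with
  | nil => exact absurd (List.prefix_nil.mp (List.isPrefixOf_iff_prefix.mp hp)) hsep
  | cons c rest =>
      unfold PySem.Chars.splitOn
      simp only [List.length_cons]
      simp only [PySem.Chars.splitOn.go, hp, if_true]
      rw [pvGo_acc]
      simp

-- a join of a nonempty take is a prefix of the full join
theorem pvJoin_take_prefix (sep w : List Char) (tl : List (List Char)) (m : Nat) :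
    PySem.Chars.join sep ((w :: tl).take (m + 1)) <+: PySem.Chars.join sep (w :: tl) := by
  rw [List.take_succ_cons, pvJoin_eq, pvJoin_eq]
  refine ⟨((tl.drop m).map (sep ++ ·)).flatten, ?_⟩
  simp only [pvJoinPre, List.append_assoc]
  rw [← List.flatten_append, ← List.map_append, List.take_append_drop]

-- B's chosen prefix on a list starting with an empty piece: the output starts with sep
theorem pvAlt_shape (n : Int) (hn : 1 ≤ n) (sep w2 : List Char) (r2 : List (List Char)) :
    ∃ z, PySem.Chars.join sep (([] :: w2 :: r2).take
        ((((pvCum (sep.length : Int) (-(sep.length : Int)) ([] :: w2 :: r2)).findIdx?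
            (fun t => n ≤ t)).getD (([] :: w2 :: r2).length - 1)) + 1)) = sep ++ z := by
  have hc : pvCum (sep.length : Int) (-(sep.length : Int)) ([] :: w2 :: r2) =
      0 :: pvCum (sep.length : Int) 0 (w2 :: r2) := by
    norm_num [pvCum]
  rw [hc, List.findIdx?_cons]
  rw [if_neg (by simp; omega)]
  cases hfi : (pvCum (sep.length : Int) 0 (w2 :: r2)).findIdx? (fun t => decide (n ≤ t)) with
  | none =>
      simp only [hfi, Option.map_none, Option.getD_none, List.length_cons, Nat.add_sub_cancel]
      rw [List.take_of_length_le (by simp)]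
      exact ⟨PySem.Chars.join sep (w2 :: r2), by rw [PySem.Chars.join_cons_cons]; simp⟩
  | some i =>
      simp only [hfi, Option.map_some, Option.getD_some]
      rw [List.take_succ_cons, List.take_succ_cons]
      exact ⟨PySem.Chars.join sep (w2 :: List.take i r2), by rw [PySem.Chars.join_cons_cons]; simp⟩

-- ===== VERDICT (by name: the statements are the Claim_ definitions above) =====
theorem min_case_spec : Claim_unchanged_min_case := by
  intro s n sep _ hpre hnd
  have hsep : sep.toList ≠ [] := by
    intro h; apply hpre
    have h2 := congrArg String.ofList h
    simpa using h2
  show min_case s n sep = min_case_alt s n sep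
  unfold min_case min_case_alt
  have hse : sep.toList.isEmpty = false := by simpa [List.isEmpty_iff] using hsep
  cases ht : PySem.Chars.strip s.toList with
  | nil =>
      simp only [PySem.Chars.split?, hse, Bool.false_eq_true, if_false, pvSplitOn_nil]
      by_cases hn : n ≤ 0
      · simp [pvLoopA, pvCum, hn, PySem.Chars.join_singleton]
      · have : ¬ n ≤ (0 : Int) + (sep.toList.length : Int) + 0 - (sep.toList.length : Int) := by omega
        simp [pvLoopA, pvCum, hn, PySem.Chars.join_singleton,
          List.findIdx?_cons, show ¬ n ≤ ((0:Int)) by omega]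
  | cons c t =>
      simp only [PySem.Chars.split?, hse, Bool.false_eq_true, if_false]
      by_cases hn : n ≤ 0
      · -- first prefix already reaches n_max in both programs
        obtain ⟨w, rest, hw⟩ :
            ∃ w rest, PySem.Chars.splitOn (c :: t) sep.toList = w :: rest := by
          unfold PySem.Chars.splitOn
          obtain ⟨w, r, h⟩ := pvGo_head sep.toList ((c :: t).length + 1) (c :: t) []
          exact ⟨w, r, by rw [h]; simp⟩
        rw [hw]
        have h0 : n ≤ (w.length : Int) := le_trans hn (by positivity)
        have hfi : n ≤ -(sep.toList.length : Int) + (sep.toList.length : Int) + (w.length : Int) := by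
          omega
        simp [pvLoopA, pvCum, h0, List.findIdx?_cons, hfi, PySem.Chars.join_singleton]
      · -- stripped string does not start with the separator (¬ D_), so the first piece is nonempty
        have hp : ¬ sep.toList.isPrefixOf (c :: t) = true := by
          intro h
          exact hnd ⟨by rw [ht]; exact h, by omega⟩
        obtain ⟨w, rest, hw⟩ := pvSplitOn_head sep.toList c t hp
        rw [hw]
        exact congrArg String.ofList (pv_tail n sep.toList (c :: w) rest (List.cons_ne_nil c w))

theorem min_case_changed : Claim_changed_min_case := by
  unfold Claim_changed_min_case; decide

theorem min_case_tight : Claim_exact_min_case := by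
  intro s n sep _ hpre hD
  unfold D_min_case at hD
  obtain ⟨hpref, hn⟩ := hD
  have hsep : sep.toList ≠ [] := by
    intro h; apply hpre
    have h2 := congrArg String.ofList h
    simpa using h2
  have hse : sep.toList.isEmpty = false := by simpa [List.isEmpty_iff] using hsep
  have hL : 0 < sep.toList.length := List.length_pos_of_ne_nil hsep
  have htne : PySem.Chars.strip s.toList ≠ [] := by
    intro h
    rw [h] at hpref
    exact hsep (List.prefix_nil.mp (List.isPrefixOf_iff_prefix.mp hpref))
  have htlen : 0 < (PySem.Chars.strip s.toList).length := List.length_pos_of_ne_nil htne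
  -- split the stripped text: an empty first piece, then ws2
  have hsplit := pvSplit_prefix sep.toList (PySem.Chars.strip s.toList) hsep hpref
  obtain ⟨w2, r2, hws2⟩ := pvGo_head sep.toList (PySem.Chars.strip s.toList).length
    ((PySem.Chars.strip s.toList).drop sep.toList.length) []
  simp only [List.reverse_nil, List.nil_append] at hws2
  have hfuel : ((PySem.Chars.strip s.toList).drop sep.toList.length).length <
      (PySem.Chars.strip s.toList).length := by
    simp only [List.length_drop]; omega
  -- A's value: the loop over the pieces
  have hA : min_case s n sep = String.ofList (pvLoopA n sep.toList []
      ([] :: PySem.Chars.splitOn.go sep.toList (PySem.Chars.strip s.toList).length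
        ((PySem.Chars.strip s.toList).drop sep.toList.length) [] [])) := by
    unfold min_case
    simp only [PySem.Chars.split?, hse, Bool.false_eq_true, if_false, hsplit]
  -- B's value: starts with sep
  have hB : ∃ z, min_case_alt s n sep = String.ofList (sep.toList ++ z) := by
    unfold min_case_alt
    simp only [PySem.Chars.split?, hse, Bool.false_eq_true, if_false, hsplit, hws2]
    obtain ⟨z, hz⟩ := pvAlt_shape n hn sep.toList w2 r2
    exact ⟨z, by rw [hz]⟩
  obtain ⟨z, hz⟩ := hB
  rw [hA, hz]
  -- A skips the first (empty) piece, then the leading empty run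
  have hskip : pvLoopA n sep.toList []
      ([] :: PySem.Chars.splitOn.go sep.toList (PySem.Chars.strip s.toList).length
        ((PySem.Chars.strip s.toList).drop sep.toList.length) [] []) =
      pvLoopA n sep.toList [] (pvDropEmpty
        (PySem.Chars.splitOn.go sep.toList (PySem.Chars.strip s.toList).length
          ((PySem.Chars.strip s.toList).drop sep.toList.length) [] [])) := by
    rw [show pvLoopA n sep.toList []
        ([] :: PySem.Chars.splitOn.go sep.toList (PySem.Chars.strip s.toList).length
          ((PySem.Chars.strip s.toList).drop sep.toList.length) [] []) =
        pvLoopA n sep.toList []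
          (PySem.Chars.splitOn.go sep.toList (PySem.Chars.strip s.toList).length
            ((PySem.Chars.strip s.toList).drop sep.toList.length) [] []) from by
      simp only [pvLoopA]
      norm_num
      exact fun hc => absurd hn (by omega)]
    exact pvLoopA_dropEmpty n sep.toList _ (by omega)
  rw [hskip]
  intro hcontra
  have hlists := congrArg String.toList hcontra
  simp only [String.toList_ofList] at hlists
  -- case on whether anything is left after the empty run
  cases hde : pvDropEmpty (PySem.Chars.splitOn.go sep.toList (PySem.Chars.strip s.toList).length
      ((PySem.Chars.strip s.toList).drop sep.toList.length) [] []) with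
  | nil =>
      rw [hde] at hlists
      simp only [pvLoopA] at hlists
      exact hsep (List.append_eq_nil_iff.mp hlists.symm).1
  | cons w tl =>
      have hw : w ≠ [] := pvDropEmpty_head_ne _ _ _ hde
      rw [hde, pv_tail n sep.toList w tl hw] at hlists
      -- sep is a prefix of A's output, hence of the full rejoined tail: contradiction
      have hpA : sep.toList <+: PySem.Chars.join sep.toList
          ((w :: tl).take ((((pvCum (sep.toList.length : Int) (-(sep.toList.length : Int))
            (w :: tl)).findIdx? (fun c => n ≤ c)).getD ((w :: tl).length - 1)) + 1)) :=
        ⟨z, hlists.symm⟩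
      have hpFull : sep.toList <+: PySem.Chars.join sep.toList (w :: tl) :=
        hpA.trans (pvJoin_take_prefix sep.toList w tl _)
      have hnp := pvGo_dropEmpty_not_prefix sep.toList hsep
        (PySem.Chars.strip s.toList).length
        ((PySem.Chars.strip s.toList).drop sep.toList.length) hfuel
        (by rw [hde]; simp)
      rw [hde] at hnp
      exact hnp (List.isPrefixOf_iff_prefix.mpr hpFull)
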